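-- pv_equiv track=rewrite | github.com/pavanreddy7756/OutfitAI | backend/app/services/outfit_builder.py | check_pattern_compatibility
-- ===== SOURCE A (Python) =====
-- from typing import List, Dict, Optional, Set
--
-- PATTERN_INTENSITY = {
--     'solid': 0,
--     'minimal': 1,
--     'striped': 4,
--     'checkered': 5,
--     'plaid': 6,
--     'floral': 7,
--     'graphic': 8,
--     'tie-dye': 9,
--     'camo': 7,
--     'paisley': 8
-- }
--
-- def get_pattern_intensity(item: Dict) -> int:
--     """Get pattern intensity for an item (0-10)"""
--     pattern = (item.get('pattern') or 'solid').lower()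
--
--     for key, value in PATTERN_INTENSITY.items():
--         if key in pattern:
--             return value
--
--     return 0
--
-- def check_pattern_compatibility(items: List[Dict]) -> bool:
--     """Check if patterns don't clash"""
--     patterns = [get_pattern_intensity(item) for item in items]
--     loud_patterns = [p for p in patterns if p >= 6]
--
--     # Allow max 1 loud pattern
--     if len(loud_patterns) > 1:
--         return False
--
--     # If one loud pattern, others should be minimal
--     if loud_patterns:
--         other_patterns = [p for p in patterns if p < 6]
--         if any(p > 3 for p in other_patterns):
--             return False
--
--     return True
-- ===== SOURCE B (Python) =====
-- from typing import List, Dict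
--
-- PATTERN_INTENSITY = {
--     'solid': 0,
--     'minimal': 1,
--     'striped': 4,
--     'checkered': 5,
--     'plaid': 6,
--     'floral': 7,
--     'graphic': 8,
--     'tie-dye': 9,
--     'camo': 7,
--     'paisley': 8
-- }
--
-- def get_pattern_intensity(item: Dict) -> int:
--     """Get pattern intensity for an item (0-10)"""
--     pattern = (item.get('pattern') or 'solid').lower()
--     for key, value in PATTERN_INTENSITY.items():
--         if key in pattern:
--             return value
--     return 0
--
-- def check_pattern_compatibility(items: List[Dict]) -> bool:
--     """Order-statistics view: the outfit clashes exactly when the loudest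
--     pattern is loud (>= 6) and the second-loudest is more than minimal (> 3)."""
--     top2 = sorted((get_pattern_intensity(item) for item in items), reverse=True)[:2]
--     if len(top2) < 2:
--         return True
--     return not (top2[0] >= 6 and top2[1] > 3)
-- ===== Notes on version B (the rewrite author's own statement) =====
-- stated objective: alternative
-- what changed: Replaces A's counting logic (count of loud patterns plus a rescan of the sub-6 ones) by an order-statistics characterisation: sort the intensities descending and decide from the top two alone (clash iff max >= 6 and second-max > 3).
import Mathlib
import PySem

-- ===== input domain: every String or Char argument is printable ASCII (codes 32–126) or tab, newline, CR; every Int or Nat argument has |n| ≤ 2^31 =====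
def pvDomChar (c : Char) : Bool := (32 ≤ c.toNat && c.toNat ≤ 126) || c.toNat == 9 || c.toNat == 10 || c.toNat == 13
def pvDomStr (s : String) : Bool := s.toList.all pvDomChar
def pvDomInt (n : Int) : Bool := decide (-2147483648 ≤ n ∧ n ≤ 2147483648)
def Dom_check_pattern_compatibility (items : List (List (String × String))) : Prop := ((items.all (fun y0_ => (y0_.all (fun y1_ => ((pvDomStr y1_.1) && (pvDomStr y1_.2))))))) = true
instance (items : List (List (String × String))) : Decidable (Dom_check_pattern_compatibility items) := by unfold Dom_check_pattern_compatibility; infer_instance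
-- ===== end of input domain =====

-- B decides from the two largest intensities after a descending sort (clash iff
-- max ≥ 6 and second-max > 3) instead of A's loud-count plus rescan; objective: alternative.

-- shared module-level helper, identical in Source A and Source B
def PATTERN_INTENSITY : List (String × Int) :=
  [("solid", 0), ("minimal", 1), ("striped", 4), ("checkered", 5), ("plaid", 6),
   ("floral", 7), ("graphic", 8), ("tie-dye", 9), ("camo", 7), ("paisley", 8)]

def get_pattern_intensity (item : List (String × String)) : Int :=
  let pattern :=
    PySem.Str.lower
      (match PySem.Dict.get? (PySem.Dict.mk item) "pattern" with
       | some s => if s = "" then "solid" else s   -- (… or 'solid'): empty string is falsy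
       | none => "solid")
  match PATTERN_INTENSITY.find? (fun kv => PySem.Str.isIn kv.1 pattern) with
  | some kv => kv.2
  | none => 0

-- ===== PORT A =====
def check_pattern_compatibility (items : List (List (String × String))) : Bool :=
  let patterns := items.map get_pattern_intensity
  let loud_patterns := patterns.filter (fun p => p ≥ 6)
  if loud_patterns.length > 1 then false
  else if !loud_patterns.isEmpty then
    let other_patterns := patterns.filter (fun p => p < 6)
    if other_patterns.any (fun p => p > 3) then false else true
  else true

-- ===== PORT B =====
def check_pattern_compatibility_alt (items : List (List (String × String))) : Bool :=
  let top2 :=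
    PySem.List.slice
      (PySem.List.sorted (items.map get_pattern_intensity) (fun p => p) true)
      none (some 2)                                   -- sorted(…, reverse=True)[:2]
  if top2.length < 2 then true
  else !(decide (top2.getD 0 0 ≥ 6) && decide (top2.getD 1 0 > 3))
  -- top2[0]/top2[1]: indices are in range in this branch, so getD is exact

-- ===== PRECONDITION & SPEC =====
def Spec_check_pattern_compatibility (items : List (List (String × String))) (out : Bool) : Prop := out = check_pattern_compatibility_alt items
instance (items : List (List (String × String))) (out : Bool) : Decidable (Spec_check_pattern_compatibility items out) := by unfold Spec_check_pattern_compatibility; infer_instance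

-- ===== CLAIM =====
def Claim_equal_check_pattern_compatibility : Prop := ∀ (items : List (List (String × String))), Dom_check_pattern_compatibility items → Spec_check_pattern_compatibility items (check_pattern_compatibility items)

-- ===== LEMMAS AND PROOFS =====

-- A's result, characterised over the bag of intensities: loud count and the moderate flag
def lc (ps : List Int) : Nat := (ps.filter (fun p => p ≥ 6)).length
def hm (ps : List Int) : Bool := ps.any (fun p => decide (p < 6) && decide (p > 3))

lemma checkA_eq (items : List (List (String × String))) :
    check_pattern_compatibility items =
      if lc (items.map get_pattern_intensity) > 1 then false
      else !(lc (items.map get_pattern_intensity) == 1 && hm (items.map get_pattern_intensity)) := by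
  simp only [check_pattern_compatibility, lc, hm]
  set ps := items.map get_pattern_intensity with hps
  have hother : (ps.filter (fun p => p < 6)).any (fun p => p > 3)
      = ps.any (fun p => decide (p < 6) && decide (p > 3)) := by
    simp [List.any_filter]
  by_cases h1 : (ps.filter (fun p => p ≥ 6)).length > 1
  · rw [if_pos h1, if_pos h1]
  · rw [if_neg h1, if_neg h1]
    by_cases h0 : (ps.filter (fun p => p ≥ 6)).isEmpty
    · have hz : (ps.filter (fun p => p ≥ 6)).length = 0 := by
        rw [List.isEmpty_iff] at h0; simp [h0]
      simp [h0, hz]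
    · have hone : (ps.filter (fun p => p ≥ 6)).length = 1 := by
        rw [List.isEmpty_iff, ← List.length_eq_zero_iff] at h0
        omega
      simp [h0, hone, hother]
      rw [Bool.eq_iff_iff]
      simp [List.any_eq_true]

-- A's condition read off a descending rearrangement: only the first two entries matter
lemma top2_char (ps s : List Int) (hp : s.Perm ps)
    (hs : List.Pairwise (fun x y => y ≤ x) s) :
    (if lc ps > 1 then false else !(lc ps == 1 && hm ps))
      = (match s with
         | a :: b :: _ => !(decide (a ≥ 6) && decide (b > 3))
         | _ => true) := by
  have hlc : lc ps = lc s := by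
    simp only [lc]
    exact ((List.Perm.filter _ hp).length_eq).symm
  have hhm : hm ps = hm s := by
    simp only [hm]
    rw [Bool.eq_iff_iff]
    simp only [List.any_eq_true]
    constructor <;> intro ⟨x, hx, hx2⟩
    · exact ⟨x, hp.mem_iff.mpr hx, hx2⟩
    · exact ⟨x, hp.mem_iff.mp hx, hx2⟩
  rw [hlc, hhm]
  match s, hs with
  | [], _ => simp [lc, hm]
  | [a], _ => by_cases h6 : (6:Int) ≤ a <;> simp [lc, hm, h6]
  | a :: b :: t, hs =>
    have ha : ∀ y ∈ b :: t, y ≤ a := (List.pairwise_cons.mp hs).1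
    have hbt : ∀ y ∈ t, y ≤ b := (List.pairwise_cons.mp (List.pairwise_cons.mp hs).2).1
    by_cases h6 : (6:Int) ≤ a
    · by_cases hb6 : (6:Int) ≤ b
      · -- two loud patterns; b > 3 as well
        have : lc (a :: b :: t) > 1 := by
          simp [lc, h6, hb6]
        simp only [this, if_pos]
        have h3 : (3:Int) < b := by omega
        simp [h6, h3]
      · -- exactly one loud pattern (a); everything from b on is < 6
        have hlt6 : ∀ y ∈ b :: t, y < 6 := by
          intro y hy
          rcases List.mem_cons.mp hy with rfl | hy
          · omega
          · have := hbt y hy; omega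
        have hnil : List.filter (fun p => decide (p ≥ 6)) (b :: t) = [] :=
          List.filter_eq_nil_iff.mpr (fun x hx => by
            have := hlt6 x hx; simp; omega)
        have hone : lc (a :: b :: t) = 1 := by
          simp [lc, h6, hnil]
        rw [hone]
        have hma : ¬ (a < 6 ∧ 3 < a) := by omega
        by_cases h3 : (3:Int) < b
        · have : hm (a :: b :: t) = true := by
            simp only [hm, List.any_eq_true]
            simp only [List.mem_cons, Bool.and_eq_true, decide_eq_true_eq]
            exact ⟨b, Or.inr (Or.inl rfl), by omega, h3⟩
          simp [this, h6, h3]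
        · have : hm (a :: b :: t) = false := by
            simp only [hm]
            rw [List.any_eq_false]
            intro x hx
            rcases List.mem_cons.mp hx with rfl | hx
            · simp; omega
            · rcases List.mem_cons.mp hx with rfl | hx
              · simp; omega
              · have := hbt x hx; simp; omega
          simp [this, h6, h3]
    · -- no loud pattern at all
      have hz : List.filter (fun p => decide (p ≥ 6)) (a :: b :: t) = [] :=
        List.filter_eq_nil_iff.mpr (fun x hx => by
          have : x ≤ a := by
            rcases List.mem_cons.mp hx with rfl | hx
            · omega
            · have := ha x hx; omega
          simp; omega)
      have : lc (a :: b :: t) = 0 := by simp [lc, hz]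
      simp [this, h6]

-- B unfolded on the shape of the sorted list
lemma checkB_eq (items : List (List (String × String))) :
    check_pattern_compatibility_alt items
      = (match PySem.List.sorted (items.map get_pattern_intensity) (fun p => p) true with
         | a :: b :: _ => !(decide (a ≥ 6) && decide (b > 3))
         | _ => true) := by
  unfold check_pattern_compatibility_alt
  have h2 : PySem.List.slice
      (PySem.List.sorted (items.map get_pattern_intensity) (fun p => p) true) none (some 2)
      = (PySem.List.sorted (items.map get_pattern_intensity) (fun p => p) true).take 2 := by
    have := PySem.List.slice_to_natCast
      (PySem.List.sorted (items.map get_pattern_intensity) (fun p => p) true) 2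
    simpa using this
  rw [h2]
  match PySem.List.sorted (items.map get_pattern_intensity) (fun p => p) true with
  | [] => simp
  | [a] => simp
  | a :: b :: t => simp [List.take, List.getD]

-- ===== VERDICT =====
theorem check_pattern_compatibility_spec : Claim_equal_check_pattern_compatibility := by
  intro items _
  unfold Spec_check_pattern_compatibility
  rw [checkA_eq, checkB_eq]
  exact top2_char _ _ (PySem.List.sorted_perm _ _ _)
    (by simpa using PySem.List.sorted_pairwise_rev (items.map get_pattern_intensity) (fun p => p))
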